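-- pv_equiv track=rewrite | github.com/jskretchmer/TIDES | src/tides/basis_utils.py | occ_sort
-- ===== SOURCE A (Python) =====
-- def occ_sort(occ_list):
--     nocc = []
--     nvirt = []
--     for idx, occ in enumerate(occ_list):
--         if occ > 0:
--             nocc.append(idx)
--         else:
--             nvirt.append(idx)
--     return tuple(nocc + nvirt)
-- ===== SOURCE B (Python) =====
-- def occ_sort(occ_list):
--     # One-line stable sort of the index range: occupied (occ > 0) keys to False
--     # and sorts first; stability keeps the original order within each group.
--     return tuple(sorted(range(len(occ_list)), key=lambda i: occ_list[i] <= 0))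
-- ===== Notes on version B (the rewrite author's own statement) =====
-- stated objective: simpler
-- what changed: Replaces the explicit two-accumulator partition over enumerate with a single stable sort of range(len(occ_list)) keyed by the boolean occ_list[i] <= 0, so occupied indices come first and stability preserves intra-group order.
import Mathlib
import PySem

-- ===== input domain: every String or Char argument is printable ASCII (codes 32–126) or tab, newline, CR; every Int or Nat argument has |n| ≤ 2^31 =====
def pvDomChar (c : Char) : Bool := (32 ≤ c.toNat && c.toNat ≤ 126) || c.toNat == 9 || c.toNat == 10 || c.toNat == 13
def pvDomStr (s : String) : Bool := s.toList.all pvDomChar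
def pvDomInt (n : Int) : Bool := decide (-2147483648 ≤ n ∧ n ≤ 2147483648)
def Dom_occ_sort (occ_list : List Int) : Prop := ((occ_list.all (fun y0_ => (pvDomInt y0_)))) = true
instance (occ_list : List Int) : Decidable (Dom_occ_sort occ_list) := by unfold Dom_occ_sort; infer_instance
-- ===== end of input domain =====

-- B replaces A's explicit two-list partition with one stable sort of the index
-- range by the boolean key occ_list[i] <= 0 (simpler, same result).


-- ===== PORT A =====
def occ_sort (occ_list : List Int) : List Int :=
  let p := (PySem.List.enumerate occ_list).foldl
    (fun (st : List Int × List Int) (iv : Int × Int) =>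
      if iv.2 > 0 then (st.1 ++ [iv.1], st.2) else (st.1, st.2 ++ [iv.1]))
    ([], [])
  p.1 ++ p.2

-- ===== PORT B =====
def occ_sort_alt (occ_list : List Int) : List Int :=
  PySem.List.sorted (PySem.List.pyRange 0 (occ_list.length : Int) 1)
    (fun i => decide (PySem.List.pyGetD occ_list i 0 ≤ 0)) false

-- ===== PRECONDITION & SPEC =====
def Spec_occ_sort (occ_list : List Int) (out : List Int) : Prop := out = occ_sort_alt occ_list
instance (occ_list : List Int) (out : List Int) : Decidable (Spec_occ_sort occ_list out) := by unfold Spec_occ_sort; infer_instance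

-- ===== CLAIM (what is proved, stated in full; the proofs are below) =====
def Claim_equal_occ_sort : Prop := ∀ (occ_list : List Int), Dom_occ_sort occ_list → Spec_occ_sort occ_list (occ_sort occ_list)

-- ===== LEMMAS AND PROOFS =====

-- Inserting a false-keyed element into "all-false as ++ all-true bs" puts it after as.
theorem insertBy_false {α : Type} (k : α → Bool) (x : α) (as bs : List α)
    (hx : k x = false) (has : ∀ a ∈ as, k a = false) (hbs : ∀ b ∈ bs, k b = true) :
    PySem.List.insertBy (fun a b => decide (k a < k b)) x (as ++ bs) = as ++ x :: bs := by
  induction as with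
  | nil =>
    cases bs with
    | nil => simp [PySem.List.insertBy]
    | cons b t =>
      have hb := hbs b (by simp)
      simp [PySem.List.insertBy, hx, hb]
  | cons a t ih =>
    have ha := has a (by simp)
    have := ih (fun a' h => has a' (by simp [h]))
    simp [PySem.List.insertBy, hx, ha, this]

-- Inserting a true-keyed element appends it at the end.
theorem insertBy_true {α : Type} (k : α → Bool) (x : α) (ys : List α)
    (hx : k x = true) :
    PySem.List.insertBy (fun a b => decide (k a < k b)) x ys = ys ++ [x] := by
  apply PySem.List.insertBy_of_forall_not_before
  intro y _
  simp [hx]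

-- Loop invariant for stable insertion sort with a boolean key.
theorem foldl_insertBy_bool {α : Type} (k : α → Bool) (l as bs : List α)
    (has : ∀ a ∈ as, k a = false) (hbs : ∀ b ∈ bs, k b = true) :
    l.foldl (fun acc x => PySem.List.insertBy (fun a b => decide (k a < k b)) x acc) (as ++ bs)
      = (as ++ l.filter (fun x => !k x)) ++ (bs ++ l.filter k) := by
  induction l generalizing as bs with
  | nil => simp
  | cons x t ih =>
    by_cases hx : k x = true
    · rw [List.foldl_cons, insertBy_true k x (as ++ bs) hx, List.append_assoc]
      have := ih as (bs ++ [x]) has (by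
        intro b hb
        rcases List.mem_append.1 hb with h | h
        · exact hbs b h
        · simp at h; simpa [h])
      rw [this]
      simp [hx]
    · have hx' : k x = false := by simpa using hx
      rw [List.foldl_cons, insertBy_false k x as bs hx' has hbs]
      have := ih (as ++ [x]) bs (by
        intro a ha
        rcases List.mem_append.1 ha with h | h
        · exact has a h
        · simp at h; simpa [h]) hbs
      rw [show as ++ x :: bs = (as ++ [x]) ++ bs by simp]
      rw [this]
      simp [hx']

-- Stable sort by a boolean key is the partition: false-keyed first, then true-keyed.
theorem sorted_bool_key {α : Type} (xs : List α) (k : α → Bool) :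
    PySem.List.sorted xs k false = xs.filter (fun x => !k x) ++ xs.filter k := by
  rw [PySem.List.sorted_eq_foldl_insertBy]
  have := foldl_insertBy_bool k xs [] [] (by simp) (by simp)
  simpa using this

-- A's accumulator loop computes the two filtered index lists.
theorem occ_sort_foldl (l : List (Int × Int)) (as bs : List Int) :
    l.foldl (fun (st : List Int × List Int) (iv : Int × Int) =>
        if iv.2 > 0 then (st.1 ++ [iv.1], st.2) else (st.1, st.2 ++ [iv.1])) (as, bs)
      = (as ++ (l.filter (fun p => decide (p.2 > 0))).map (·.1),
         bs ++ (l.filter (fun p => !decide (p.2 > 0))).map (·.1)) := by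
  induction l generalizing as bs with
  | nil => simp
  | cons p t ih =>
    by_cases hp : p.2 > 0
    · simp [List.foldl_cons, hp, ih,]
    · simp [List.foldl_cons, hp, ih]

-- ===== VERDICT (by name: the statement is the Claim_ definition above) =====
theorem occ_sort_spec : Claim_equal_occ_sort := by
  intro occ_list _
  unfold Spec_occ_sort occ_sort occ_sort_alt
  rw [sorted_bool_key, PySem.List.enumerate_eq_map_pyRange occ_list 0, occ_sort_foldl]
  simp only [List.filter_map, List.map_map, Function.comp_def]
  simp only [List.map_id']
  congr 1
  · exact List.filter_congr (fun i _ => by rw [← decide_not]; exact decide_eq_decide.2 (by omega))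
  · exact List.filter_congr (fun i _ => by rw [← decide_not]; exact decide_eq_decide.2 (by omega))
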